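-- pv_equiv track=rewrite | github.com/hossainmd-uc/tip-103 | Class1.py | tiggerfy
-- ===== SOURCE A (Python) =====
-- def tiggerfy(word):
--     # First make the word all lowercase (.lower)
--     #
--
--     word_l = word.lower()
--
--     final = ""
--     i = 0
--
--     while i < len(word):
--         single = word_l[i]
--         double = word_l[i : i + 2]
--
--         if double == "gg" or double == "er":
--             i += 2
--         elif single == "t" or single == "i":
--             i += 1
--         else:
--             final += word[i]
--             i += 1
--
--     return final
-- ===== SOURCE B (Python) =====
-- def tiggerfy(word):
--     # Explicit stack of (original, lowercase) pairs, popped one at a time;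
--     # no index arithmetic or slicing of the strings themselves.
--     stack = list(zip(word, word.lower()))
--     stack.reverse()
--     out = []
--     while stack:
--         o, l = stack.pop()
--         if stack and (l + stack[-1][1]) in ("gg", "er"):
--             stack.pop()
--         elif l not in ("t", "i"):
--             out.append(o)
--     return "".join(out)
-- ===== Notes on version B (the rewrite author's own statement) =====
-- stated objective: faster
-- what changed: Replaced the index-driven while loop that slices two parallel strings and grows the result by repeated string concatenation with an explicit stack of zipped (original, lowercase) character pairs popped one at a time into an output list joined once at the end.
import Mathlib
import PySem

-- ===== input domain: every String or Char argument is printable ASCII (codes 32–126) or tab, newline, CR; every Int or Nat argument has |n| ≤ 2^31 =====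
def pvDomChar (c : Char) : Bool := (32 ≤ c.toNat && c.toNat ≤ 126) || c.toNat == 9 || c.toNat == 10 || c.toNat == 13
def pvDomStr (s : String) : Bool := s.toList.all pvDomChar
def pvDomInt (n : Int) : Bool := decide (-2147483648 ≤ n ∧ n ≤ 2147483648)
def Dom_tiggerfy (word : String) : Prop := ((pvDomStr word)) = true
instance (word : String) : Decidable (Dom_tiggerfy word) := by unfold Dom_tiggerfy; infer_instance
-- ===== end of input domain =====

-- B replaces A's index-and-slice while loop over two parallel strings by an explicit
-- stack of zipped (original, lowercase) pairs popped one at a time (objective: alternative).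

-- ===== PORT A =====
-- the while loop of A: i is the scan index into word / word_l, final the accumulator
def tigLoopA (w wl : List Char) (i : Nat) (final : List Char) : List Char :=
  if _h : i < w.length then
    let single := PySem.List.pyGetD wl (i : Int) ' '
    let double := PySem.List.slice wl (some (i : Int)) (some ((i : Int) + 2))
    if double = ['g', 'g'] ∨ double = ['e', 'r'] then
      tigLoopA w wl (i + 2) final
    else if single = 't' ∨ single = 'i' then
      tigLoopA w wl (i + 1) final
    else
      tigLoopA w wl (i + 1) (final ++ [PySem.List.pyGetD w (i : Int) ' '])
  else final
termination_by w.length - i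

def tiggerfy (word : String) : String :=
  String.mk (tigLoopA word.toList (PySem.Chars.lower word.toList) 0 [])

-- ===== PORT B =====
-- B's while loop over the stack of (original, lowercase) pairs; the Python stack is the
-- reversed pair list popped from its end, transcribed here as the pair list consumed from
-- its head (the same sequence of pops), with `out` the output accumulator.
def tigLoopB : List (Char × Char) → List Char → List Char
  | [], out => out
  | (o, l) :: stack, out =>
    match stack with
    | (o2, l2) :: stack' =>
      if (l = 'g' ∧ l2 = 'g') ∨ (l = 'e' ∧ l2 = 'r') then tigLoopB stack' out
      else if ¬ (l = 't' ∨ l = 'i') then tigLoopB ((o2, l2) :: stack') (out ++ [o])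
      else tigLoopB ((o2, l2) :: stack') out
    | [] => if ¬ (l = 't' ∨ l = 'i') then out ++ [o] else out

def tiggerfy_alt (word : String) : String :=
  String.mk (tigLoopB (word.toList.zip (PySem.Chars.lower word.toList)) [])

-- ===== PRECONDITION & SPEC =====
def Spec_tiggerfy (word : String) (out : String) : Prop := out = tiggerfy_alt word
instance (word : String) (out : String) : Decidable (Spec_tiggerfy word out) := by unfold Spec_tiggerfy; infer_instance

-- ===== CLAIM (what is proved, stated in full; the proofs are below) =====
def Claim_equal_tiggerfy : Prop := ∀ (word : String), Dom_tiggerfy word → Spec_tiggerfy word (tiggerfy word)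


-- ===== LEMMAS AND PROOFS =====
lemma lower_eq_map (cs : List Char) : PySem.Chars.lower cs = cs.map PySem.Chars.lowerChar := rfl

lemma map_drop_comm (w : List Char) (f : Char → Char) (j : Nat) :
    (w.map f).drop j = (w.drop j).map f := by
  first | exact List.map_drop .. | exact (List.map_drop ..).symm

lemma tigLoopA_eq (w : List Char) : ∀ (n i : Nat) (acc : List Char), w.length - i ≤ n →
    tigLoopA w (w.map PySem.Chars.lowerChar) i acc =
      tigLoopB ((w.drop i).map (fun c => (c, PySem.Chars.lowerChar c))) acc := by
  intro n
  induction n with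
  | zero =>
    intro i acc h
    have hle : w.length ≤ i := by omega
    rw [tigLoopA, List.drop_eq_nil_of_le hle]
    simp [Nat.not_lt.mpr hle, tigLoopB]
  | succ n ih =>
    intro i acc h
    rw [tigLoopA]
    by_cases h1 : i < w.length
    · rw [dif_pos h1]
      have hget : PySem.List.pyGetD (w.map PySem.Chars.lowerChar) (i : Int) ' '
          = PySem.Chars.lowerChar w[i] := by simp [pysem, h1]
      have hgetw : PySem.List.pyGetD w (i : Int) ' ' = w[i] := by simp [pysem, h1]
      have hcast : ((i : Int) + 2) = ((i : Int) + ((2 : Nat) : Int)) := by norm_num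
      have hslice : PySem.List.slice (w.map PySem.Chars.lowerChar) (some (i : Int))
            (some ((i : Int) + 2))
          = ((w.drop i).map PySem.Chars.lowerChar).take 2 := by
        rw [hcast, PySem.List.slice_natCast_add, map_drop_comm]
      have hdrop : w.drop i = w[i] :: w.drop (i + 1) := List.drop_eq_getElem_cons h1
      rcases hd : w.drop (i + 1) with _ | ⟨c2, rest⟩
      · -- last character of the word
        rw [hget, hslice, hdrop, hd]
        simp only [List.map_cons, List.map_nil, List.take_succ_cons, List.take_nil, tigLoopB]
        have hfalse : ¬ ([PySem.Chars.lowerChar w[i]] = ['g', 'g'] ∨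
            [PySem.Chars.lowerChar w[i]] = ['e', 'r']) := by simp
        rw [if_neg hfalse]
        have hA1 := ih (i + 1) acc (by omega)
        have hA2 := ih (i + 1) (acc ++ [PySem.List.pyGetD w (i : Int) ' ']) (by omega)
        rw [hd] at hA1 hA2
        simp only [List.map_nil, tigLoopB] at hA1 hA2
        split_ifs with h2 <;> simp_all
      · -- at least two characters remain
        have hd2 : w.drop (i + 2) = rest := by
          have : w.drop (i + 2) = (w.drop (i + 1)).drop 1 := by
            rw [List.drop_drop]
          rw [this, hd]; rfl
        rw [hget, hslice, hdrop, hd]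
        simp only [List.map_cons, List.take_succ_cons, List.take_zero, tigLoopB]
        simp only [List.cons.injEq, and_true]
        have hA0 := ih (i + 2) acc (by omega)
        have hA1 := ih (i + 1) acc (by omega)
        have hA2 := ih (i + 1) (acc ++ [PySem.List.pyGetD w (i : Int) ' ']) (by omega)
        rw [hd2] at hA0
        rw [hd] at hA1 hA2
        split_ifs with hgg hti <;> simp_all
    · rw [dif_neg h1]
      have hle : w.length ≤ i := by omega
      rw [List.drop_eq_nil_of_le hle]
      simp [tigLoopB]

-- ===== VERDICT (by name: the statement is the Claim_ definition above) =====
theorem tiggerfy_spec : Claim_equal_tiggerfy := by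
  intro word _
  unfold Spec_tiggerfy tiggerfy tiggerfy_alt
  rw [lower_eq_map,
    tigLoopA_eq word.toList word.toList.length 0 [] (by omega)]
  congr 2
  simp only [List.drop_zero]
  simpa using (List.zip_map' (f := id) (g := PySem.Chars.lowerChar) (l := word.toList)).symm
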